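-- pv_equiv track=rewrite | github.com/OpenBlatam/Automation-StartUps | marketing_brain_realtime_sentiment_analyzer.py | _analyze_aspects
-- ===== SOURCE A (Python) =====
-- def _analyze_aspects(text):
--     """Analizar aspectos mencionados en el texto"""
--     aspects = {
--         'product': 0,
--         'service': 0,
--         'price': 0,
--         'quality': 0,
--         'delivery': 0,
--         'support': 0
--     }
--
--     # Diccionario de palabras por aspecto
--     aspect_words = {
--         'product': ['product', 'item', 'goods', 'merchandise'],
--         'service': ['service', 'help', 'assistance', 'support'],
--         'price': ['price', 'cost', 'expensive', 'cheap', 'affordable'],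
--         'quality': ['quality', 'good', 'bad', 'excellent', 'poor'],
--         'delivery': ['delivery', 'shipping', 'fast', 'slow', 'arrived'],
--         'support': ['support', 'customer', 'service', 'help', 'assistance']
--     }
--
--     words = text.split()
--     for word in words:
--         for aspect, aspect_list in aspect_words.items():
--             if word in aspect_list:
--                 aspects[aspect] += 1
--
--     return aspects
-- ===== SOURCE B (Python) =====
-- def _analyze_aspects(text):
--     """Analizar aspectos mencionados en el texto (one tally pass, then per-aspect sums)."""
--     freq = {}
--     for w in text.split():
--         freq[w] = freq.get(w, 0) + 1
--     aspect_words = {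
--         'product': ['product', 'item', 'goods', 'merchandise'],
--         'service': ['service', 'help', 'assistance', 'support'],
--         'price': ['price', 'cost', 'expensive', 'cheap', 'affordable'],
--         'quality': ['quality', 'good', 'bad', 'excellent', 'poor'],
--         'delivery': ['delivery', 'shipping', 'fast', 'slow', 'arrived'],
--         'support': ['support', 'customer', 'service', 'help', 'assistance'],
--     }
--     return {a: sum(freq.get(w, 0) for w in ws) for a, ws in aspect_words.items()}
-- ===== Notes on version B (the rewrite author's own statement) =====
-- stated objective: alternative
-- what changed: Replaces the word-outer/aspect-inner nested membership scan by a single frequency-tally pass over the words followed by a per-aspect sum of the tallied counts of its keywords.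
import Mathlib
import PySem

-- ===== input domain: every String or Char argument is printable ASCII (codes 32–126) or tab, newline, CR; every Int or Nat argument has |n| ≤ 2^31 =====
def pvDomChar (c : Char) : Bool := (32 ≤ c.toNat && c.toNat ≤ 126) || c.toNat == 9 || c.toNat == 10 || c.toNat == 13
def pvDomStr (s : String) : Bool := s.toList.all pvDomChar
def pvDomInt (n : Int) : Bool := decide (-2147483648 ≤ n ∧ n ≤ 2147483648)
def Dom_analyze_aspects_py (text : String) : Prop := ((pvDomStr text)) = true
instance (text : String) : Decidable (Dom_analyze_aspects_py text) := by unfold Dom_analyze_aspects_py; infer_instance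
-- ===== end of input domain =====

-- B replaces A's word-outer/aspect-inner nested scan by one frequency-tally pass plus per-aspect sums (alternative decomposition, same results).

-- ===== PORT A =====
def pvAspectWordsA : List (String × List String) :=
  [("product", ["product", "item", "goods", "merchandise"]),
   ("service", ["service", "help", "assistance", "support"]),
   ("price", ["price", "cost", "expensive", "cheap", "affordable"]),
   ("quality", ["quality", "good", "bad", "excellent", "poor"]),
   ("delivery", ["delivery", "shipping", "fast", "slow", "arrived"]),
   ("support", ["support", "customer", "service", "help", "assistance"])]

-- 'aspects[aspect] += 1': the key is always present (modify's default 0 is never used)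
def analyze_aspects_py (text : String) : List (String × Int) :=
  let aspects : PySem.Dict String Int :=
    PySem.Dict.ofList [("product", 0), ("service", 0), ("price", 0),
                       ("quality", 0), ("delivery", 0), ("support", 0)]
  let words := PySem.Str.split₀ text
  (words.foldl (fun d word =>
    pvAspectWordsA.foldl (fun d p => if word ∈ p.2 then d.modify p.1 0 (· + 1) else d) d) aspects).items

-- ===== PORT B =====
-- (B's aspect_words literal is the same table: shared as pvAspectWordsA)

def analyze_aspects_py_alt (text : String) : List (String × Int) :=
  let freq : PySem.Dict String Int :=
    (PySem.Str.split₀ text).foldl (fun d w => d.insert w (d.getD w 0 + 1)) PySem.Dict.empty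
  pvAspectWordsA.map (fun p => (p.1, (p.2.map (fun w => freq.getD w 0)).sum))

-- ===== PRECONDITION & SPEC =====
def Spec_analyze_aspects_py (text : String) (out : List (String × Int)) : Prop := out = analyze_aspects_py_alt text
instance (text : String) (out : List (String × Int)) : Decidable (Spec_analyze_aspects_py text out) := by unfold Spec_analyze_aspects_py; infer_instance

-- ===== CLAIM (what is proved, stated in full; the proofs are below) =====
def Claim_equal_analyze_aspects_py : Prop := ∀ (text : String), Dom_analyze_aspects_py text → Spec_analyze_aspects_py text (analyze_aspects_py text)

-- ===== LEMMAS AND PROOFS =====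

-- one word through A's inner aspect loop, on a dict with the six fixed keys
lemma pv_inner (w : String) (v1 v2 v3 v4 v5 v6 : Int) :
    pvAspectWordsA.foldl (fun d p => if w ∈ p.2 then d.modify p.1 0 (· + 1) else d)
      (PySem.Dict.mk [("product", v1), ("service", v2), ("price", v3),
                      ("quality", v4), ("delivery", v5), ("support", v6)]) =
    PySem.Dict.mk
      [("product", v1 + (if w ∈ ["product", "item", "goods", "merchandise"] then 1 else 0)),
       ("service", v2 + (if w ∈ ["service", "help", "assistance", "support"] then 1 else 0)),
       ("price", v3 + (if w ∈ ["price", "cost", "expensive", "cheap", "affordable"] then 1 else 0)),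
       ("quality", v4 + (if w ∈ ["quality", "good", "bad", "excellent", "poor"] then 1 else 0)),
       ("delivery", v5 + (if w ∈ ["delivery", "shipping", "fast", "slow", "arrived"] then 1 else 0)),
       ("support", v6 + (if w ∈ ["support", "customer", "service", "help", "assistance"] then 1 else 0))] := by
  simp only [pvAspectWordsA, List.foldl_cons, List.foldl_nil]
  split_ifs <;>
    simp [PySem.Dict.modify, PySem.Dict.insert, PySem.Dict.getD, PySem.Dict.get?, PySem.Dict.contains]

-- A's whole double loop, as six countP's
lemma pv_outer (ws : List String) (v1 v2 v3 v4 v5 v6 : Int) :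
    ws.foldl (fun d word =>
        pvAspectWordsA.foldl (fun d p => if word ∈ p.2 then d.modify p.1 0 (· + 1) else d) d)
      (PySem.Dict.mk [("product", v1), ("service", v2), ("price", v3),
                      ("quality", v4), ("delivery", v5), ("support", v6)]) =
    PySem.Dict.mk
      [("product", v1 + (ws.countP (fun w => decide (w ∈ ["product", "item", "goods", "merchandise"])) : Int)),
       ("service", v2 + (ws.countP (fun w => decide (w ∈ ["service", "help", "assistance", "support"])) : Int)),
       ("price", v3 + (ws.countP (fun w => decide (w ∈ ["price", "cost", "expensive", "cheap", "affordable"])) : Int)),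
       ("quality", v4 + (ws.countP (fun w => decide (w ∈ ["quality", "good", "bad", "excellent", "poor"])) : Int)),
       ("delivery", v5 + (ws.countP (fun w => decide (w ∈ ["delivery", "shipping", "fast", "slow", "arrived"])) : Int)),
       ("support", v6 + (ws.countP (fun w => decide (w ∈ ["support", "customer", "service", "help", "assistance"])) : Int))] := by
  induction ws generalizing v1 v2 v3 v4 v5 v6 with
  | nil => simp
  | cons w ws ih =>
    rw [List.foldl_cons, pv_inner, ih]
    simp only [List.countP_cons, PySem.Dict.mk.injEq, List.cons.injEq, Prod.mk.injEq,
      true_and, and_true, decide_eq_true_eq]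
    refine ⟨?_, ?_, ?_, ?_, ?_, ?_⟩ <;> (split_ifs <;> push_cast <;> ring)

-- countP of membership in a∷l splits off count of a when a ∉ l
lemma pv_countP_cons (a : String) (l ws : List String) (h : a ∉ l) :
    ws.countP (fun w => decide (w ∈ a :: l)) = ws.count a + ws.countP (fun w => decide (w ∈ l)) := by
  induction ws with
  | nil => rfl
  | cons x xs ih =>
    simp only [List.countP_cons, List.count_cons, ih]
    rcases eq_or_ne x a with hx | hx
    · subst hx
      simp [h, List.mem_cons]
      omega
    · by_cases hl : x ∈ l <;> simp [hx, hl, List.mem_cons] <;> omega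

-- countP of membership in a duplicate-free list = sum of the individual counts
lemma pv_count_list (ws l : List String) (h : l.Nodup) :
    (ws.countP (fun w => decide (w ∈ l)) : Int) = (l.map (fun a => (ws.count a : Int))).sum := by
  induction l with
  | nil => simp
  | cons a l ih =>
    rcases List.nodup_cons.mp h with ⟨ha, hl⟩
    rw [pv_countP_cons a l ws ha]
    simp [ih hl]

-- ===== VERDICT (by name: the statement is the Claim_ definition above) =====
theorem analyze_aspects_py_spec : Claim_equal_analyze_aspects_py := by
  intro text _
  show analyze_aspects_py text = analyze_aspects_py_alt text
  unfold analyze_aspects_py analyze_aspects_py_alt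
  dsimp only
  rw [show (PySem.Dict.ofList [("product", (0:Int)), ("service", 0), ("price", 0),
        ("quality", 0), ("delivery", 0), ("support", 0)] : PySem.Dict String Int) =
      PySem.Dict.mk [("product", 0), ("service", 0), ("price", 0),
        ("quality", 0), ("delivery", 0), ("support", 0)] from rfl]
  rw [pv_outer]
  simp only [pvAspectWordsA, List.map_cons, List.map_nil, List.sum_cons, List.sum_nil,
    PySem.Dict.getD_foldl_insert_add_one]
  simp only [List.cons.injEq, Prod.mk.injEq, true_and, and_true]
  refine ⟨?_, ?_, ?_, ?_, ?_, ?_⟩ <;>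
    · rw [pv_count_list _ _ (by decide)]
      simp [PySem.Dict.getD, PySem.Dict.get?, PySem.Dict.empty]
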